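-- pv_equiv track=rewrite | github.com/hyama1569/siera | augmentation/util/extract.py | extract_ad_spans
-- ===== SOURCE A (Python) =====
-- def extract_ad_spans(edits):
--     ad_spans = []
--     seen_a = [0 for i in range(len(edits))]
--     for i in range(len(edits) - 1):
--         if seen_a[i] != 1:
--             if edits[i] != 'KEEP' and edits[i] != 'DEL':
--                 start = i
--                 j = i + 1
--                 flag = False
--                 while j < len(edits):
--                     if edits[j] == 'DEL':
--                         j += 1
--                         flag = True
--                     elif edits[j] != 'KEEP' and edits[j] != 'DEL':
--                         if flag == False:
--                             seen_a[j] = 1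
--                             j += 1
--                         else:
--                             break
--                     else:
--                         break
--                 if flag == True:
--                     end = j - 1
--                     if end - start > 0:
--                         ad_spans.append((start, end))
--     return ad_spans
-- ===== SOURCE B (Python) =====
-- def extract_ad_spans(edits):
--     spans = []
--     start = None
--     flag = False
--     for i, e in enumerate(edits):
--         if e == 'DEL':
--             if start is not None:
--                 flag = True
--         elif e == 'KEEP':
--             if flag:
--                 spans.append((start, i - 1))
--             start = None
--             flag = False
--         else:
--             if flag:
--                 spans.append((start, i - 1))
--                 start = i
--                 flag = False
--             elif start is None:
--                 start = i
--     if start is not None and flag: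
--         spans.append((start, len(edits) - 1))
--     return spans
-- ===== Notes on version B (the rewrite author's own statement) =====
-- stated objective: simpler
-- what changed: Replaced the nested scan (outer index loop + inner while + seen_a marking array) by a single forward pass with a (start, flag) state machine that closes spans at run boundaries.
import Mathlib
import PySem

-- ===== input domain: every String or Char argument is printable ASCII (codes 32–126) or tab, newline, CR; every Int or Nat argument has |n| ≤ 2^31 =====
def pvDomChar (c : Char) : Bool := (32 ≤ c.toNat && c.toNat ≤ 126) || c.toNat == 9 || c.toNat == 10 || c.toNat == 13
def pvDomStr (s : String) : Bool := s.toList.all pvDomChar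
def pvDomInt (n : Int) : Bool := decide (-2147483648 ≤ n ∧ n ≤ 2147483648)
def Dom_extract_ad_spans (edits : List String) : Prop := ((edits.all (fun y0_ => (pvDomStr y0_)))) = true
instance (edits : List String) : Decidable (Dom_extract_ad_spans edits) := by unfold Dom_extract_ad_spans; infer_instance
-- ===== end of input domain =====

-- B replaces A's nested scan (outer index loop + inner while + seen_a marking array) by a single
-- forward pass with a (start, flag) state machine; objective: simpler, same exact output.


-- ===== PORT A =====
def innerA (edits : List String) (j : Nat) (flag : Bool) (seen : List Nat) : Nat × Bool × List Nat :=
  if _h : j < edits.length then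
    if edits.getD j "" = "DEL" then
      innerA edits (j + 1) true seen
    else if edits.getD j "" ≠ "KEEP" ∧ edits.getD j "" ≠ "DEL" then
      if flag = false then innerA edits (j + 1) flag (seen.set j 1)
      else (j, flag, seen)
    else (j, flag, seen)
  else (j, flag, seen)
termination_by edits.length - j

def aBody (edits : List String) (st : List (Int × Int) × List Nat) (i : Nat) : List (Int × Int) × List Nat :=
  if st.2.getD i 0 ≠ 1 then
    if edits.getD i "" ≠ "KEEP" ∧ edits.getD i "" ≠ "DEL" then
      let r := innerA edits (i + 1) false st.2
      if r.2.1 = true then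
        if ((r.1 : Int) - 1) - (i : Int) > 0 then (st.1 ++ [((i : Int), (r.1 : Int) - 1)], r.2.2)
        else (st.1, r.2.2)
      else (st.1, r.2.2)
    else st
  else st

def extract_ad_spans (edits : List String) : List (Int × Int) :=
  ((List.range (edits.length - 1)).foldl (aBody edits)
    ([], List.replicate edits.length 0)).1

-- ===== PORT B =====
def bLoop (l : List String) (i : Int) (spans : List (Int × Int)) (start : Option Int) (flag : Bool) :
    List (Int × Int) × Option Int × Bool :=
  match l with
  | [] => (spans, start, flag)
  | e :: t =>
    if e = "DEL" then
      bLoop t (i + 1) spans start (if start.isSome then true else flag)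
    else if e = "KEEP" then
      bLoop t (i + 1) (if flag then spans ++ [(start.getD 0, i - 1)] else spans) none false
    else
      if flag then bLoop t (i + 1) (spans ++ [(start.getD 0, i - 1)]) (some i) false
      else if start.isSome then bLoop t (i + 1) spans start flag
      else bLoop t (i + 1) spans (some i) flag

def extract_ad_spans_alt (edits : List String) : List (Int × Int) :=
  let r := bLoop edits 0 [] none false
  if r.2.1.isSome && r.2.2 then r.1 ++ [(r.2.1.getD 0, (edits.length : Int) - 1)] else r.1

-- ===== PRECONDITION & SPEC =====
def Spec_extract_ad_spans (edits : List String) (out : List (Int × Int)) : Prop := out = extract_ad_spans_alt edits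
instance (edits : List String) (out : List (Int × Int)) : Decidable (Spec_extract_ad_spans edits out) := by unfold Spec_extract_ad_spans; infer_instance

-- ===== CLAIM (what is proved, stated in full; the proofs are below) =====
def Claim_equal_extract_ad_spans : Prop := ∀ (edits : List String), Dom_extract_ad_spans edits → Spec_extract_ad_spans edits (extract_ad_spans edits)

-- ===== LEMMAS AND PROOFS =====

def isA (e : String) : Bool := e != "KEEP" && e != "DEL"

def isD (e : String) : Bool := e == "DEL"

lemma isA_iff (e : String) : isA e = true ↔ (e ≠ "KEEP" ∧ e ≠ "DEL") := by
  simp [isA]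

lemma isD_eq (e : String) : isD e = true ↔ e = "DEL" := by simp [isD]

def chunks : Nat → List String → List (Int × Int)
  | _, [] => []
  | i, x :: t =>
    if isA x then
      let a := 1 + (t.takeWhile isA).length
      let t2 := t.drop (a - 1)
      let d := (t2.takeWhile isD).length
      (if 0 < d then [((i : Int), (i : Int) + (a : Int) + (d : Int) - 1)] else []) ++
        chunks (i + a + d) (t2.drop d)
    else chunks (i + 1) t
termination_by i t => t.length
decreasing_by
  · have h1 : (t.takeWhile isA).length ≤ t.length := by
      induction t with
      | nil => simp
      | cons y s ih => by_cases h : isA y <;> simp [h] <;> omega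
    simp only [List.length_drop, List.length_cons]
    omega
  · simp only [List.length_cons]; omega

def bClose (r : List (Int × Int) × Option Int × Bool) (e : Int) : List (Int × Int) :=
  if r.2.1.isSome && r.2.2 then r.1 ++ [(r.2.1.getD 0, e - 1)] else r.1

def openC (s : Int) (i : Nat) (t : List String) : List (Int × Int) :=
  let a := (t.takeWhile isA).length
  let t2 := t.drop a
  let d := (t2.takeWhile isD).length
  if 0 < d then (s, (i : Int) + (a : Int) + (d : Int) - 1) :: chunks (i + a + d) (t2.drop d)
  else chunks (i + a) t2

def closeC (s : Int) (i : Nat) (t : List String) : List (Int × Int) :=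
  let d := (t.takeWhile isD).length
  (s, (i : Int) + (d : Int) - 1) :: chunks (i + d) (t.drop d)

lemma chunks_cons_skip (i : Nat) (e : String) (t : List String) (h : isA e = false) :
    chunks i (e :: t) = chunks (i + 1) t := by
  rw [chunks]; simp [h]

lemma chunks_cons_add (i : Nat) (e : String) (t : List String) (h : isA e = true) :
    chunks i (e :: t) = openC ((i : Nat) : Int) (i + 1) t := by
  rw [chunks, openC]
  simp only [h, if_true, show (1 : Nat) + (List.takeWhile isA t).length - 1 = (List.takeWhile isA t).length from by omega]
  have h1 : i + (1 + (List.takeWhile isA t).length) + (List.takeWhile isD (List.drop (List.takeWhile isA t).length t)).length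
      = i + 1 + (List.takeWhile isA t).length + (List.takeWhile isD (List.drop (List.takeWhile isA t).length t)).length := by omega
  have h2 : ((i : Int) + ((1 + (List.takeWhile isA t).length : Nat) : Int) + (((List.takeWhile isD (List.drop (List.takeWhile isA t).length t)).length : Nat) : Int) - 1)
      = (((i + 1 : Nat)) : Int) + (((List.takeWhile isA t).length : Nat) : Int) + (((List.takeWhile isD (List.drop (List.takeWhile isA t).length t)).length : Nat) : Int) - 1 := by push_cast; ring
  rw [h1, h2]
  split_ifs with hd
  · simp
  · have hz : (List.takeWhile isD (List.drop (List.takeWhile isA t).length t)).length = 0 := by omega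
    simp [hz]

lemma chunks_single (i : Nat) (x : String) : chunks i [x] = [] := by
  rw [chunks]
  split_ifs <;> simp [chunks]

lemma openC_cons_add (s : Int) (i : Nat) (e : String) (t : List String) (h : isA e = true) :
    openC s i (e :: t) = openC s (i + 1) t := by
  rw [openC, openC]
  simp only [List.takeWhile_cons, h, if_true, List.length_cons, List.drop_succ_cons]
  have h1 : i + ((List.takeWhile isA t).length + 1) + (List.takeWhile isD (List.drop (List.takeWhile isA t).length t)).length
      = i + 1 + (List.takeWhile isA t).length + (List.takeWhile isD (List.drop (List.takeWhile isA t).length t)).length := by omega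
  have h1b : i + ((List.takeWhile isA t).length + 1) = i + 1 + (List.takeWhile isA t).length := by omega
  have h2 : ((i : Int) + (((List.takeWhile isA t).length + 1 : Nat) : Int) + (((List.takeWhile isD (List.drop (List.takeWhile isA t).length t)).length : Nat) : Int) - 1)
      = (((i + 1 : Nat)) : Int) + (((List.takeWhile isA t).length : Nat) : Int) + (((List.takeWhile isD (List.drop (List.takeWhile isA t).length t)).length : Nat) : Int) - 1 := by push_cast; ring
  rw [h1, h1b, h2]

lemma openC_cons_del (s : Int) (i : Nat) (t : List String) :
    openC s i ("DEL" :: t) = closeC s (i + 1) t := by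
  rw [openC, closeC]
  simp only [List.takeWhile_cons, show isA "DEL" = false from by decide,
    show isD "DEL" = true from by decide, Bool.false_eq_true, if_true, if_false, List.takeWhile_nil,
    List.length_nil, List.drop_zero, List.length_cons, List.drop_succ_cons]
  have h1 : i + 0 + ((List.takeWhile isD t).length + 1) = i + 1 + (List.takeWhile isD t).length := by omega
  have h2 : ((i : Int) + ((0 : Nat) : Int) + (((List.takeWhile isD t).length + 1 : Nat) : Int) - 1)
      = (((i + 1 : Nat)) : Int) + (((List.takeWhile isD t).length : Nat) : Int) - 1 := by push_cast; ring
  rw [h1, h2]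
  simp

lemma openC_cons_keep (s : Int) (i : Nat) (t : List String) :
    openC s i ("KEEP" :: t) = chunks (i + 1) t := by
  rw [openC]
  simp only [List.takeWhile_cons, show isA "KEEP" = false from by decide,
    show isD "KEEP" = false from by decide, Bool.false_eq_true, if_false,
    List.takeWhile_nil, List.length_nil, List.drop_zero]
  rw [chunks]
  simp [show isA "KEEP" = false from by decide]

lemma closeC_cons_del (s : Int) (i : Nat) (t : List String) :
    closeC s i ("DEL" :: t) = closeC s (i + 1) t := by
  rw [closeC, closeC]
  simp only [List.takeWhile_cons, show isD "DEL" = true from by decide, if_true,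
    List.length_cons, List.drop_succ_cons]
  have h1 : i + ((List.takeWhile isD t).length + 1) = i + 1 + (List.takeWhile isD t).length := by omega
  have h2 : ((i : Int) + (((List.takeWhile isD t).length + 1 : Nat) : Int) - 1)
      = (((i + 1 : Nat)) : Int) + (((List.takeWhile isD t).length : Nat) : Int) - 1 := by push_cast; ring
  rw [h1, h2]

lemma closeC_not_del (s : Int) (i : Nat) (e : String) (t : List String) (h : isD e = false) :
    closeC s i (e :: t) = (s, (i : Int) - 1) :: chunks i (e :: t) := by
  rw [closeC]
  simp [List.takeWhile_cons, h]

theorem bLoop_chunks (t : List String) : ∀ (i : Nat) (acc : List (Int × Int)),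
    (bClose (bLoop t (i : Int) acc none false) ((i + t.length : Nat) : Int) = acc ++ chunks i t)
    ∧ (∀ s : Int, bClose (bLoop t (i : Int) acc (some s) false) ((i + t.length : Nat) : Int) = acc ++ openC s i t)
    ∧ (∀ s : Int, bClose (bLoop t (i : Int) acc (some s) true) ((i + t.length : Nat) : Int) = acc ++ closeC s i t) := by
  induction t with
  | nil =>
    intro i acc
    refine ⟨?_, ?_, ?_⟩
    · simp [bLoop, bClose, chunks]
    · intro s; simp [bLoop, bClose, openC, chunks]
    · intro s; simp [bLoop, bClose, closeC, chunks]
  | cons e t ih =>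
    intro i acc
    have hL : (i + (e :: t).length : Nat) = ((i + 1) + t.length : Nat) := by simp; omega
    have hc : ((i : Nat) : Int) + 1 = (((i + 1 : Nat)) : Int) := by push_cast; ring
    rw [hL]
    by_cases hD : e = "DEL"
    · subst hD
      refine ⟨?_, ?_, ?_⟩
      · rw [bLoop]
        simp only [if_pos rfl, Option.isSome_none, Bool.false_eq_true, if_false, hc, ite_true]
        rw [(ih (i + 1) acc).1, chunks_cons_skip _ _ _ (by decide)]
      · intro s
        rw [bLoop]
        simp only [if_pos rfl, Option.isSome_some, if_true, hc, ite_true]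
        rw [(ih (i + 1) acc).2.2 s, openC_cons_del]
      · intro s
        rw [bLoop]
        simp only [if_pos rfl, Option.isSome_some, if_true, hc, ite_true]
        rw [(ih (i + 1) acc).2.2 s, closeC_cons_del]
    · by_cases hK : e = "KEEP"
      · subst hK
        refine ⟨?_, ?_, ?_⟩
        · rw [bLoop]
          simp only [if_neg hD, if_pos rfl, Bool.false_eq_true, if_false, hc, ite_true, Option.isSome_none]
          rw [(ih (i + 1) acc).1, chunks_cons_skip _ _ _ (by decide)]
        · intro s
          rw [bLoop]
          simp only [if_neg hD, if_pos rfl, Bool.false_eq_true, if_false, hc, ite_true, Option.isSome_none]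
          rw [(ih (i + 1) acc).1, openC_cons_keep]
        · intro s
          rw [bLoop]
          simp only [if_neg hD, if_pos rfl, if_true, hc, ite_true, Option.getD_some]
          rw [(ih (i + 1) (acc ++ [(s, (i : Int) - 1)])).1,
            closeC_not_del s i _ t (by simp [isD, hD]),
            chunks_cons_skip _ _ _ (by decide)]
          simp
      · have hA : isA e = true := by simp [isA, hD, hK]
        refine ⟨?_, ?_, ?_⟩
        · rw [bLoop]
          simp only [if_neg hD, if_neg hK, Bool.false_eq_true, if_false, Option.isSome_none, hc]
          rw [(ih (i + 1) acc).2.1 ((i : Nat) : Int), chunks_cons_add _ _ _ hA]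
        · intro s
          rw [bLoop]
          simp only [if_neg hD, if_neg hK, Bool.false_eq_true, if_false, Option.isSome_some, if_true, hc]
          rw [(ih (i + 1) acc).2.1 s, openC_cons_add _ _ _ _ hA]
        · intro s
          rw [bLoop]
          simp only [if_neg hD, if_neg hK, if_true, hc, Option.getD_some]
          rw [(ih (i + 1) (acc ++ [(s, (i : Int) - 1)])).2.1 ((i : Nat) : Int),
            closeC_not_del s i _ t (by simp [isD, hD]),
            chunks_cons_add _ _ _ hA]
          simp

lemma takeWhile_le {α : Type} (p : α → Bool) (l : List α) : (l.takeWhile p).length ≤ l.length := by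
  induction l with
  | nil => simp
  | cons x t ih => by_cases h : p x <;> simp [h] <;> omega

lemma takeWhile_getD (p : String → Bool) : ∀ (l : List String) (k : Nat),
    k < (l.takeWhile p).length → p (l.getD k "") = true := by
  intro l
  induction l with
  | nil => simp
  | cons x t ih =>
    intro k hk
    by_cases h : p x
    · cases k with
      | zero => simpa using h
      | succ k => simp only [List.getD_cons_succ]; exact ih k (by simpa [h] using hk)
    · simp [h] at hk

lemma takeWhile_boundary (p : String → Bool) : ∀ (l : List String),
    (l.takeWhile p).length < l.length → p (l.getD (l.takeWhile p).length "") = false := by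
  intro l
  induction l with
  | nil => simp
  | cons x t ih =>
    intro hk
    by_cases h : p x
    · simpa [h] using ih (by simpa [h] using hk)
    · simpa [h] using h

lemma getD_drop (l : List String) (m k : Nat) : (l.drop m).getD k "" = l.getD (m + k) "" := by
  simp [List.getD_eq_getElem?_getD, List.getElem?_drop]

lemma innerA_oob (edits : List String) (j : Nat) (flag : Bool) (seen : List Nat)
    (h : edits.length ≤ j) : innerA edits j flag seen = (j, flag, seen) := by
  rw [innerA]; rw [dif_neg (by omega)]

lemma innerA_stop (edits : List String) (j : Nat) (flag : Bool) (seen : List Nat)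
    (hj : j < edits.length) (hne : edits.getD j "" ≠ "DEL")
    (h : flag = true ∨ isA (edits.getD j "") = false) :
    innerA edits j flag seen = (j, flag, seen) := by
  rw [innerA, dif_pos hj, if_neg hne]
  by_cases hA : edits.getD j "" ≠ "KEEP" ∧ edits.getD j "" ≠ "DEL"
  · rw [if_pos hA]
    rcases h with h | h
    · rw [h]; simp
    · exact absurd ((isA_iff _).mpr hA) (by simp only [h]; simp)
  · rw [if_neg hA]

lemma innerA_del (edits : List String) (j : Nat) (flag : Bool) (seen : List Nat)
    (hj : j < edits.length) (h : edits.getD j "" = "DEL") :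
    innerA edits j flag seen = innerA edits (j + 1) true seen := by
  rw [innerA, dif_pos hj, if_pos h]

lemma innerA_add (edits : List String) (j : Nat) (seen : List Nat)
    (hj : j < edits.length) (hA : isA (edits.getD j "") = true) :
    innerA edits j false seen = innerA edits (j + 1) false (seen.set j 1) := by
  have hp := (isA_iff _).mp hA
  rw [innerA, dif_pos hj, if_neg hp.2, if_pos hp, if_pos rfl]

def markUp : List Nat → Nat → Nat → List Nat
  | seen, _, 0 => seen
  | seen, j, m + 1 => markUp (seen.set j 1) (j + 1) m

lemma markUp_length : ∀ (m : Nat) (seen : List Nat) (j : Nat), (markUp seen j m).length = seen.length := by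
  intro m
  induction m with
  | zero => intro seen j; rfl
  | succ m ih => intro seen j; simp [markUp, ih]

lemma markUp_getD : ∀ (m : Nat) (seen : List Nat) (j k : Nat),
    (markUp seen j m).getD k 0 =
      if j ≤ k ∧ k < j + m ∧ k < seen.length then 1 else seen.getD k 0 := by
  intro m
  induction m with
  | zero =>
    intro seen j k
    rw [markUp]
    rw [if_neg (by omega)]
  | succ m ih =>
    intro seen j k
    rw [markUp, ih]
    have hset : (seen.set j 1).getD k 0 = if j = k ∧ j < seen.length then 1 else seen.getD k 0 := by
      simp only [List.getD_eq_getElem?_getD, List.getElem?_set]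
      split_ifs with h1 h2 h3 h3 <;> simp_all <;> omega
    rw [List.length_set, hset]
    split_ifs <;> first | rfl | omega

lemma innerA_addPhase (edits : List String) : ∀ (m j : Nat) (seen : List Nat),
    (∀ k, k < m → j + k < edits.length ∧ isA (edits.getD (j + k) "") = true) →
    innerA edits j false seen = innerA edits (j + m) false (markUp seen j m) := by
  intro m
  induction m with
  | zero => intro j seen _; rw [markUp]; rfl
  | succ m ih =>
    intro j seen h
    have h0 := h 0 (by omega)
    rw [innerA_add edits j seen (by omega) (by simpa using h0.2)]
    rw [markUp]
    have hrec := ih (j + 1) (seen.set j 1) ?_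
    · rw [hrec]
      congr 1
      omega
    · intro k hk
      have h1 := (h (k + 1) (by omega)).1
      have h2 := (h (k + 1) (by omega)).2
      refine ⟨by omega, ?_⟩
      rw [show j + 1 + k = j + (k + 1) from by omega]
      exact h2

lemma innerA_delPhase (edits : List String) : ∀ (m j : Nat) (seen : List Nat),
    (∀ k, k < m → j + k < edits.length ∧ edits.getD (j + k) "" = "DEL") →
    innerA edits j true seen = innerA edits (j + m) true seen := by
  intro m
  induction m with
  | zero => intro j seen _; rfl
  | succ m ih =>
    intro j seen h
    have h0 := h 0 (by omega)
    rw [innerA_del edits j true seen (by omega) (by simpa using h0.2)]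
    have hrec := ih (j + 1) seen ?_
    · rw [hrec]
      congr 1
      omega
    · intro k hk
      have h1 := (h (k + 1) (by omega)).1
      have h2 := (h (k + 1) (by omega)).2
      refine ⟨by omega, ?_⟩
      rw [show j + 1 + k = j + (k + 1) from by omega]
      exact h2

lemma innerA_char' (edits : List String) (i : Nat) (seen : List Nat) (a d : Nat)
    (hi : i < edits.length)
    (ha : a = ((edits.drop (i+1)).takeWhile isA).length)
    (hd : d = (((edits.drop (i+1)).drop a).takeWhile isD).length) :
    innerA edits (i + 1) false seen = (i + 1 + a + d, decide (0 < d), markUp seen (i + 1) a) := by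
  have htlen : (edits.drop (i+1)).length = edits.length - (i + 1) := by simp
  have hale : a ≤ edits.length - (i + 1) := by
    rw [ha, ← htlen]; exact takeWhile_le _ _
  have hdle : d ≤ edits.length - (i + 1) - a := by
    have h1 := takeWhile_le isD ((edits.drop (i+1)).drop a)
    have h2 : ((edits.drop (i+1)).drop a).length = edits.length - (i + 1) - a := by
      simp
      omega
    rw [h2] at h1
    rw [hd]
    exact h1
  -- phase 1: absorb the ADD tokens at positions i+1 … i+a
  have hphase1 : innerA edits (i + 1) false seen = innerA edits (i + 1 + a) false (markUp seen (i + 1) a) := by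
    apply innerA_addPhase
    intro k hk
    refine ⟨by omega, ?_⟩
    have := takeWhile_getD isA (edits.drop (i+1)) k (by omega)
    rwa [getD_drop] at this
  rw [hphase1]
  have hdget : ∀ k, k < d → i + 1 + a + k < edits.length ∧ edits.getD (i + 1 + a + k) "" = "DEL" := by
    intro k hk
    have h1 := takeWhile_getD isD ((edits.drop (i+1)).drop a) k (by omega)
    rw [getD_drop, getD_drop] at h1
    refine ⟨by omega, ?_⟩
    rw [show i + 1 + a + k = i + 1 + (a + k) from by omega]
    exact (isD_eq _).mp h1
  rcases Nat.eq_zero_or_pos d with hd0 | hdpos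
  · -- no DEL after the ADD block: stop at i+1+a with flag false
    subst hd0
    simp only [Nat.add_zero, decide_eq_true_eq]
    by_cases hend : i + 1 + a < edits.length
    · have hbA : isA (edits.getD (i + 1 + a) "") = false := by
        have := takeWhile_boundary isA (edits.drop (i+1)) (by omega)
        rwa [getD_drop, ← ha] at this
      have hbD : edits.getD (i + 1 + a) "" ≠ "DEL" := by
        have hlt : (((edits.drop (i+1)).drop a).takeWhile isD).length < ((edits.drop (i+1)).drop a).length := by
          rw [← hd]; simp; omega
        have := takeWhile_boundary isD ((edits.drop (i+1)).drop a) hlt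
        rw [← hd, getD_drop, getD_drop] at this
        intro hcon
        rw [show i + 1 + (a + 0) = i + 1 + a from by omega, hcon] at this
        simp [isD] at this
      rw [innerA_stop _ _ _ _ hend hbD (Or.inr hbA)]
      simp
    · rw [innerA_oob _ _ _ _ (by omega)]
      simp
  · -- at least one DEL: step onto it, run the DEL phase, then stop
    have h0 := hdget 0 (by omega)
    rw [innerA_del _ _ _ _ (by omega) (by simpa using h0.2)]
    have hphase2 : innerA edits (i + 1 + a + 1) true (markUp seen (i + 1) a)
        = innerA edits (i + 1 + a + 1 + (d - 1)) true (markUp seen (i + 1) a) := by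
      apply innerA_delPhase
      intro k hk
      have hx := hdget (k + 1) (by omega)
      refine ⟨by omega, ?_⟩
      rw [show i + 1 + a + 1 + k = i + 1 + a + (k + 1) from by omega]
      exact hx.2
    rw [hphase2, show i + 1 + a + 1 + (d - 1) = i + 1 + a + d from by omega]
    by_cases hend : i + 1 + a + d < edits.length
    · have hbD : edits.getD (i + 1 + a + d) "" ≠ "DEL" := by
        have hlt : (((edits.drop (i+1)).drop a).takeWhile isD).length < ((edits.drop (i+1)).drop a).length := by
          rw [← hd]; simp; omega
        have := takeWhile_boundary isD ((edits.drop (i+1)).drop a) hlt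
        rw [← hd, getD_drop, getD_drop] at this
        intro hcon
        rw [show i + 1 + (a + d) = i + 1 + a + d from by omega, hcon] at this
        simp [isD] at this
      rw [innerA_stop _ _ _ _ hend hbD (Or.inl rfl)]
      simp [hdpos]
    · rw [innerA_oob _ _ _ _ (by omega)]
      simp [hdpos]

lemma foldl_noop (edits : List String) : ∀ (l : List Nat) (st : List (Int × Int) × List Nat),
    (∀ j ∈ l, aBody edits st j = st) → l.foldl (aBody edits) st = st := by
  intro l
  induction l with
  | nil => intro st _; rfl
  | cons x t ih =>
    intro st h
    rw [List.foldl_cons, h x (by simp)]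
    exact ih st (by intro j hj; exact h j (by simp [hj]))

lemma drop_cons_getD (l : List String) (i : Nat) (h : i < l.length) :
    l.drop i = l.getD i "" :: l.drop (i + 1) := by
  rw [List.drop_eq_getElem_cons h, List.getD_eq_getElem?_getD, List.getElem?_eq_getElem h]
  rfl

lemma aBody_skip (edits : List String) (st : List (Int × Int) × List Nat) (i : Nat)
    (h : st.2.getD i 0 = 1 ∨ isA (edits.getD i "") = false) :
    aBody edits st i = st := by
  unfold aBody
  rcases h with h | h
  · rw [if_neg (by omega)]
  · by_cases h1 : st.2.getD i 0 ≠ 1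
    · rw [if_pos h1, if_neg (fun hc => absurd ((isA_iff _).mpr hc) (by rw [h]; simp))]
    · rw [if_neg h1]

theorem mainA (edits : List String) : ∀ (fuel i : Nat) (acc : List (Int × Int)) (seen : List Nat),
    edits.length - i ≤ fuel →
    seen.length = edits.length →
    (∀ k, i ≤ k → seen.getD k 0 = 0) →
    ((List.range' i (edits.length - 1 - i)).foldl (aBody edits) (acc, seen)).1
      = acc ++ chunks i (edits.drop i) := by
  intro fuel
  induction fuel with
  | zero =>
    intro i acc seen hf hlen hinv
    have h1 : edits.length - 1 - i = 0 := by omega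
    have h2 : edits.drop i = [] := List.drop_eq_nil_of_le (by omega)
    rw [h1, h2]
    simp [chunks]
  | succ fuel ih =>
    intro i acc seen hf hlen hinv
    by_cases hcase : edits.length ≤ i + 1
    · have h0 : edits.length - 1 - i = 0 := by omega
      rw [h0]
      rcases Nat.lt_or_ge i edits.length with hlt | hge
      · have hdrop : edits.drop i = [edits.getD i ""] := by
          have h1 := drop_cons_getD edits i hlt
          rw [show edits.drop (i + 1) = [] from List.drop_eq_nil_of_le (by omega)] at h1
          exact h1
        rw [hdrop, chunks_single]
        simp
      · rw [List.drop_eq_nil_of_le (by omega)]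
        simp [chunks]
    · push_neg at hcase
      have hi : i < edits.length := by omega
      have hseen : seen.getD i 0 = 0 := hinv i (le_refl _)
      have hx : edits.drop i = edits.getD i "" :: edits.drop (i + 1) := drop_cons_getD edits i hi
      rw [show edits.length - 1 - i = (edits.length - 2 - i) + 1 from by omega,
        List.range'_succ, List.foldl_cons]
      by_cases hA : isA (edits.getD i "") = true
      · -- a run starts at i
        have ha' : ((edits.drop (i+1)).takeWhile isA).length ≤ edits.length - (i + 1) := by
          have := takeWhile_le isA (edits.drop (i+1))
          simpa using this
        have hd' : (((edits.drop (i+1)).drop ((edits.drop (i+1)).takeWhile isA).length).takeWhile isD).length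
            ≤ edits.length - (i + 1) - ((edits.drop (i+1)).takeWhile isA).length := by
          have h1 := takeWhile_le isD ((edits.drop (i+1)).drop ((edits.drop (i+1)).takeWhile isA).length)
          have h2 : ((edits.drop (i+1)).drop ((edits.drop (i+1)).takeWhile isA).length).length
              = edits.length - (i + 1) - ((edits.drop (i+1)).takeWhile isA).length := by
            simp
            omega
          rw [h2] at h1
          exact h1
        generalize hag : ((edits.drop (i+1)).takeWhile isA).length = a at *
        generalize hdg : (((edits.drop (i+1)).drop a).takeWhile isD).length = d at *
        have hchar := innerA_char' edits i seen a d hi hag.symm hdg.symm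
        have hbody : aBody edits (acc, seen) i =
            (acc ++ (if 0 < d then [((i : Int), ((i + 1 + a + d : Nat) : Int) - 1)] else []),
             markUp seen (i + 1) a) := by
          unfold aBody
          simp only [hseen, hchar]
          rw [if_pos (by omega), if_pos ((isA_iff _).mp hA)]
          by_cases hd0 : 0 < d
          · rw [if_pos (by simp [hd0]), if_pos (by push_cast; omega), if_pos hd0]
          · rw [if_neg (by simp [hd0]), if_neg hd0]
            simp
        rw [hbody]
        -- split the remaining range into the skipped part and the rest
        have hsk : edits.length - 2 - i = min (a + d) (edits.length - 2 - i)
            + (edits.length - 2 - i - min (a + d) (edits.length - 2 - i)) := by omega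
        rw [hsk, ← List.range'_append_1, List.foldl_append]
        have hskip : (List.range' (i + 1) (min (a + d) (edits.length - 2 - i))).foldl (aBody edits)
            (acc ++ (if 0 < d then [((i : Int), ((i + 1 + a + d : Nat) : Int) - 1)] else []),
             markUp seen (i + 1) a)
            = (acc ++ (if 0 < d then [((i : Int), ((i + 1 + a + d : Nat) : Int) - 1)] else []),
               markUp seen (i + 1) a) := by
          apply foldl_noop
          intro j hj
          rw [List.mem_range'_1] at hj
          apply aBody_skip
          by_cases hj2 : j < i + 1 + a
          · left
            rw [markUp_getD]
            rw [if_pos (by constructor; omega; constructor; omega; omega)]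
          · right
            have hk : j - (i + 1 + a) < d := by omega
            have h1 := takeWhile_getD isD ((edits.drop (i+1)).drop a) (j - (i + 1 + a)) (by omega)
            rw [getD_drop, getD_drop, show i + 1 + (a + (j - (i + 1 + a))) = j from by omega] at h1
            rw [(isD_eq _).mp h1]
            decide
        rw [hskip]
        -- the tail of the loop resumes at i' = i + 1 + a + d
        have htail : (List.range' (i + 1 + min (a + d) (edits.length - 2 - i))
              (edits.length - 2 - i - min (a + d) (edits.length - 2 - i)))
            = List.range' (i + 1 + a + d) (edits.length - 1 - (i + 1 + a + d)) := by
          by_cases hend : i + 1 + a + d ≤ edits.length - 1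
          · rw [show min (a + d) (edits.length - 2 - i) = a + d from by omega]
            congr 1
            · omega
            · omega
          · rw [show edits.length - 2 - i - min (a + d) (edits.length - 2 - i) = 0 from by omega,
              show edits.length - 1 - (i + 1 + a + d) = 0 from by omega]
            rw [List.range'_zero, List.range'_zero]
        rw [htail]
        rw [ih (i + 1 + a + d)
          (acc ++ (if 0 < d then [((i : Int), ((i + 1 + a + d : Nat) : Int) - 1)] else []))
          (markUp seen (i + 1) a) (by omega) (by rw [markUp_length]; exact hlen)
          (by
            intro k hk
            rw [markUp_getD, if_neg (by omega)]
            exact hinv k (by omega))]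
        -- identify with the chunk at i
        rw [hx, chunks]
        simp only [hA, if_true, hag, show (1 : Nat) + a - 1 = a from by omega, hdg]
        rw [List.drop_drop, List.drop_drop,
          show i + 1 + (a + d) = i + 1 + a + d from by omega]
        have harith : i + (1 + a) + d = i + 1 + a + d := by omega
        rw [harith]
        have hpair : (((i + 1 + a + d : Nat) : Int) - 1) = ((i : Nat) : Int) + ((1 + a : Nat) : Int) + ((d : Nat) : Int) - 1 := by
          push_cast
          ring
        rw [hpair]
        by_cases hd0 : 0 < d
        · simp [hd0]
        · simp [hd0]
      · -- no run at i: single skip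
        rw [aBody_skip edits (acc, seen) i (Or.inr (by simpa using hA))]
        have hnext := ih (i + 1) acc seen (by omega) hlen (by intro k hk; exact hinv k (by omega))
        rw [show edits.length - 1 - (i + 1) = edits.length - 2 - i from by omega] at hnext
        rw [hnext, hx, chunks_cons_skip _ _ _ (by simpa using hA)]

-- ===== VERDICT (by name: the statement is the Claim_ definition above) =====
theorem extract_ad_spans_spec : Claim_equal_extract_ad_spans := by
  intro edits _
  unfold Spec_extract_ad_spans
  have hA : extract_ad_spans edits = chunks 0 edits := by
    have := mainA edits edits.length 0 [] (List.replicate edits.length 0) (by omega)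
      (by simp) (by intro k _; simp [List.getD_eq_getElem?_getD, List.getElem?_replicate]; split <;> simp)
    simpa [extract_ad_spans, List.range_eq_range'] using this
  have hB : extract_ad_spans_alt edits = chunks 0 edits := by
    have := (bLoop_chunks edits 0 []).1
    simpa [extract_ad_spans_alt, bClose] using this
  rw [hA, hB]
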